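-- pv_equiv track=rewrite | github.com/shourjoguha/Gainsly | app/services/program.py | _partition_microcycle_lengths
-- ===== SOURCE A (Python) =====
-- def _partition_microcycle_lengths(total_days: int, preferred_length_days: int) -> list[int]:
--     if total_days <= 0:
--         return []
--
--     preferred_length_days = min(14, max(7, int(preferred_length_days)))
--     count = max(1, int(round(total_days / preferred_length_days)))
--
--     for _ in range(50):
--         base = total_days // count
--         remainder = total_days % count
--         if base < 7:
--             count = max(1, count - 1)
--             continue
--         if base > 14 or (base == 14 and remainder > 0):
--             count += 1
--             continue
--         break
--
--     base = total_days // count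
--     remainder = total_days % count
--     lengths = [base + 1] * remainder + [base] * (count - remainder)
--     return lengths
-- ===== SOURCE B (Python) =====
-- def _partition_microcycle_lengths(total_days: int, preferred_length_days: int) -> list[int]:
--     if total_days <= 0:
--         return []
--     p = min(14, max(7, int(preferred_length_days)))
--     # banker's rounding of total_days / p, in exact integer arithmetic
--     q, r = divmod(total_days, p)
--     start = q + (1 if (2 * r > p or (2 * r == p and q % 2 == 1)) else 0)
--     lo = -(-total_days // 14)   # ceil(total_days / 14): fewest microcycles of <= 14 days
--     hi = total_days // 7        # most microcycles of >= 7 days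
--     count = max(1, min(hi, max(start, lo)))
--     base, rem = divmod(total_days, count)
--     return [base + 1] * rem + [base] * (count - rem)
-- ===== Notes on version B (the rewrite author's own statement) =====
-- stated objective: simpler
-- what changed: Replaced A's 50-iteration ±1 convergence loop over candidate counts by a direct closed-form count: clamp the banker's-rounded total_days/preferred count into [ceil(total_days/14), total_days//7] (computed in exact integer arithmetic), then emit the remainder-balanced partition.
import Mathlib
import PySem

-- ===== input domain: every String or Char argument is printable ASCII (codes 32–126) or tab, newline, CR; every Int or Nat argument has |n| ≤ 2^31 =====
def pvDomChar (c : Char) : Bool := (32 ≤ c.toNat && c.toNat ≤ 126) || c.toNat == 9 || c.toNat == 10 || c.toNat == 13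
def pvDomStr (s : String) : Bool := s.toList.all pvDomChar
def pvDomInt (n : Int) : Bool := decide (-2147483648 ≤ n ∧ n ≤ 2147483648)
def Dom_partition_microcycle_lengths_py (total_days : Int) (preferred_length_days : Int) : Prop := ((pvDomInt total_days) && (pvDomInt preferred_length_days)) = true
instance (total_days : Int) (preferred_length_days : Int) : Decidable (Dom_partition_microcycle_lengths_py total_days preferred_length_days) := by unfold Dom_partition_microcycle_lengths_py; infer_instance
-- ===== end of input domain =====

-- B replaces A's 50-iteration ±1 convergence loop by a direct closed-form count
-- (clamp the rounded preferred count into [ceil(td/14), td//7]); objective: simpler.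

-- ===== PORT A =====
-- int(round(total_days / p)) for 7 ≤ p ≤ 14, |total_days| ≤ 2^31: exact integer model of
-- Python's float division + banker's rounding (the correctly rounded float quotient is within
-- half an ulp ≪ 1/28 of the exact rational, so it is a tie/crosses a midpoint exactly when the
-- rational is; ties (2k+1)/2 with k < 2^31 are exactly representable).
def pvRoundDiv (a : Int) (b : Int) : Int :=
  if 2 * PySem.Int.mod a b > b ∨
      (2 * PySem.Int.mod a b = b ∧ PySem.Int.mod (PySem.Int.floordiv a b) 2 = 1) then
    PySem.Int.floordiv a b + 1
  else
    PySem.Int.floordiv a b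

-- the 'for _ in range(50)' adjustment loop of A, state = count, fuel = remaining iterations
def pmclLoop (td : Int) : Nat → Int → Int
  | 0, count => count
  | Nat.succ n, count =>
    let base := PySem.Int.floordiv td count
    let remainder := PySem.Int.mod td count
    if base < 7 then pmclLoop td n (max 1 (count - 1))
    else if 14 < base ∨ (base = 14 ∧ 0 < remainder) then pmclLoop td n (count + 1)
    else count

def partition_microcycle_lengths_py (total_days : Int) (preferred_length_days : Int) : List Int :=
  if total_days ≤ 0 then []
  else
    let p := min 14 (max 7 preferred_length_days)
    let count0 := max 1 (pvRoundDiv total_days p)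
    let count := pmclLoop total_days 50 count0
    let base := PySem.Int.floordiv total_days count
    let remainder := PySem.Int.mod total_days count
    List.replicate remainder.toNat (base + 1) ++ List.replicate (count - remainder).toNat base

-- ===== PORT B =====
def partition_microcycle_lengths_py_alt (total_days : Int) (preferred_length_days : Int) : List Int :=
  if total_days ≤ 0 then []
  else
    let p := min 14 (max 7 preferred_length_days)
    -- banker's rounding of total_days / p in exact integer arithmetic (Source B's divmod formula)
    let q := PySem.Int.floordiv total_days p
    let r := PySem.Int.mod total_days p
    let start := q + (if 2 * r > p ∨ (2 * r = p ∧ PySem.Int.mod q 2 = 1) then 1 else 0)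
    let lo := -(PySem.Int.floordiv (-total_days) 14)
    let hi := PySem.Int.floordiv total_days 7
    let count := max 1 (min hi (max start lo))
    let base := PySem.Int.floordiv total_days count
    let rem := PySem.Int.mod total_days count
    List.replicate rem.toNat (base + 1) ++ List.replicate (count - rem).toNat base

-- ===== PRECONDITION & SPEC =====
def Spec_partition_microcycle_lengths_py (total_days : Int) (preferred_length_days : Int) (out : List Int) : Prop := out = partition_microcycle_lengths_py_alt total_days preferred_length_days
instance (total_days : Int) (preferred_length_days : Int) (out : List Int) : Decidable (Spec_partition_microcycle_lengths_py total_days preferred_length_days out) := by unfold Spec_partition_microcycle_lengths_py; infer_instance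

-- ===== CLAIM (what is proved, stated in full; the proofs are below) =====
def Claim_equal_partition_microcycle_lengths_py : Prop := ∀ (total_days : Int) (preferred_length_days : Int), Dom_partition_microcycle_lengths_py total_days preferred_length_days → Spec_partition_microcycle_lengths_py total_days preferred_length_days (partition_microcycle_lengths_py total_days preferred_length_days)

-- ===== LEMMAS AND PROOFS =====

-- once count is feasible (7·c ≤ td ≤ 14·c) the loop breaks immediately
theorem pmcl_break (td c : Int) (n : Nat) (hc : 0 < c) (hl : 7 * c ≤ td) (hh : td ≤ 14 * c) :
    pmclLoop td (n + 1) c = c := by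
  have h7 : ¬ (PySem.Int.floordiv td c < 7) := by
    rw [not_lt, PySem.Int.le_floordiv_iff_mul_le hc]; linarith
  have h15 : PySem.Int.floordiv td c < 15 := by
    rw [PySem.Int.floordiv_lt_iff_lt_mul hc]; linarith
  have hmod := PySem.Int.floordiv_mul_add_mod td c
  simp only [pmclLoop, if_neg h7]
  rw [if_neg]
  push_neg
  refine ⟨by omega, fun h14 => ?_⟩
  rw [h14] at hmod; omega

-- c strictly below ceil(td/14) (i.e. 14·c < td) but still with 7·c ≤ td takes the increment branch
theorem pmcl_inc (td c : Int) (n : Nat) (hc : 0 < c) (hl : 7 * c ≤ td) (hh : 14 * c < td) :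
    pmclLoop td (n + 1) c = pmclLoop td n (c + 1) := by
  have h7 : ¬ (PySem.Int.floordiv td c < 7) := by
    rw [not_lt, PySem.Int.le_floordiv_iff_mul_le hc]; linarith
  have h14 : 14 ≤ PySem.Int.floordiv td c := by
    rw [PySem.Int.le_floordiv_iff_mul_le hc]; linarith
  have hmod := PySem.Int.floordiv_mul_add_mod td c
  simp only [pmclLoop, if_neg h7]
  rw [if_pos]
  rcases lt_or_eq_of_le h14 with h | h
  · exact Or.inl h
  · exact Or.inr ⟨h.symm, by rw [← h] at hmod; omega⟩

-- c strictly above td//7 (i.e. td < 7·c) takes the decrement branch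
theorem pmcl_dec (td c : Int) (n : Nat) (hc : 0 < c) (hh : td < 7 * c) :
    pmclLoop td (n + 1) c = pmclLoop td n (max 1 (c - 1)) := by
  have h7 : PySem.Int.floordiv td c < 7 := by
    rw [PySem.Int.floordiv_lt_iff_lt_mul hc]; linarith
  simp only [pmclLoop, if_pos h7]

-- for 0 < td < 7 the loop is stuck at count = 1
theorem pmcl_small (td : Int) (h0 : 0 < td) (h7 : td < 7) :
    ∀ n : Nat, pmclLoop td n 1 = 1 := by
  intro n
  induction n with
  | zero => rfl
  | succ n ih =>
    rw [pmcl_dec td 1 n (by omega) (by omega)]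
    simpa using ih

-- the rounded start count lies in [ceil(td/14) − 1, td//7 + 1]
theorem pv_start_bounds (td p : Int) (h0 : 0 < td) (h7 : 7 ≤ p) (h14 : p ≤ 14) :
    PySem.Int.floordiv td p ≤ PySem.Int.floordiv td 7 ∧
    -(PySem.Int.floordiv (-td) 14) - 1 ≤ PySem.Int.floordiv td p := by
  have h1 := PySem.Int.floordiv_mul_add_mod td p
  have h2 := PySem.Int.mod_nonneg td (b := p) (by omega)
  have h3 := PySem.Int.mod_lt td (b := p) (by omega)
  have h4 := PySem.Int.floordiv_mul_add_mod td 7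
  have h5 := PySem.Int.mod_nonneg td (b := 7) (by omega)
  have h6 := PySem.Int.mod_lt td (b := 7) (by omega)
  have h7' := PySem.Int.floordiv_mul_add_mod (-td) 14
  have h8 := PySem.Int.mod_nonneg (-td) (b := 14) (by omega)
  have h9 := PySem.Int.mod_lt (-td) (b := 14) (by omega)
  interval_cases p <;> omega

-- the heart of the claim: the loop's final count equals B's clamped closed form
theorem pv_count_eq (td p : Int) (h0 : 0 < td) (h7 : 7 ≤ p) (h14 : p ≤ 14) :
    pmclLoop td 50 (max 1 (pvRoundDiv td p)) =
      max 1 (min (PySem.Int.floordiv td 7)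
        (max (pvRoundDiv td p) (-(PySem.Int.floordiv (-td) 14)))) := by
  have hb := pv_start_bounds td p h0 h7 h14
  have hhi := PySem.Int.floordiv_mul_add_mod td 7
  have hhi0 := PySem.Int.mod_nonneg td (b := 7) (by omega)
  have hhi7 := PySem.Int.mod_lt td (b := 7) (by omega)
  have hlo := PySem.Int.floordiv_mul_add_mod (-td) 14
  have hlo0 := PySem.Int.mod_nonneg (-td) (b := 14) (by omega)
  have hlo14 := PySem.Int.mod_lt (-td) (b := 14) (by omega)
  set q := PySem.Int.floordiv td p with hqdef
  set hi := PySem.Int.floordiv td 7 with hhidef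
  set lo := -(PySem.Int.floordiv (-td) 14) with hlodef
  have hs : pvRoundDiv td p = q ∨ pvRoundDiv td p = q + 1 := by
    unfold pvRoundDiv
    split
    · exact Or.inr rfl
    · exact Or.inl rfl
  set s := pvRoundDiv td p with hsdef
  -- linear facts: 7·hi ≤ td < 7·(hi+1), 14·(lo−1) < td ≤ 14·lo, q ≤ hi, lo − 1 ≤ q
  by_cases htd7 : td < 7
  · -- td ∈ (0,7): start collapses to 1, hi = 0, both sides are 1
    have hi0 : hi = 0 := by omega
    have hq0 : q = 0 := by
      have h1 := PySem.Int.floordiv_mul_add_mod td p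
      have h2 := PySem.Int.mod_nonneg td (b := p) (by omega)
      have h3 := PySem.Int.mod_lt td (b := p) (by omega)
      rw [← hqdef] at h1
      interval_cases p <;> omega
    have hS : max 1 s = 1 := by omega
    rw [hS, pmcl_small td h0 htd7 50]
    omega
  · -- td ≥ 7: the feasible interval [lo, hi] is nonempty and 1 ≤ lo
    push_neg at htd7
    have hfeas : 7 * lo ≤ td ∧ td ≤ 14 * lo ∧ 7 * hi ≤ td ∧ td ≤ 14 * hi ∧ 1 ≤ lo ∧ lo ≤ hi := by
      omega
    set S := max 1 s with hSdef
    by_cases hgt : hi < S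
    · -- S = hi + 1: one decrement, then break at hi
      have hS : S = hi + 1 := by omega
      rw [hS]
      rw [pmcl_dec td (hi + 1) 49 (by omega) (by omega)]
      have : max 1 (hi + 1 - 1) = hi := by omega
      rw [this, pmcl_break td hi 48 (by omega) (by omega) (by omega)]
      omega
    · by_cases hlt : S < lo
      · -- S = lo − 1: one increment, then break at lo
        have hS : S = lo - 1 := by omega
        rw [hS]
        rw [pmcl_inc td (lo - 1) 49 (by omega) (by omega) (by omega)]
        have : lo - 1 + 1 = lo := by omega
        rw [this, pmcl_break td lo 48 (by omega) (by omega) (by omega)]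
        omega
      · -- lo ≤ S ≤ hi: immediate break
        rw [pmcl_break td S 49 (by omega) (by omega) (by omega)]
        omega

-- ===== VERDICT (by name: the statement is the Claim_ definition above) =====
theorem partition_microcycle_lengths_py_spec : Claim_equal_partition_microcycle_lengths_py := by
  intro td pref _
  unfold Spec_partition_microcycle_lengths_py
  unfold partition_microcycle_lengths_py partition_microcycle_lengths_py_alt
  by_cases h0 : td ≤ 0
  · simp [h0]
  · push_neg at h0
    simp only [if_neg (not_le.mpr h0)]
    have hcount := pv_count_eq td (min 14 (max 7 pref)) h0 (by omega) (by omega)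
    have hstart : PySem.Int.floordiv td (min 14 (max 7 pref)) +
          (if 2 * PySem.Int.mod td (min 14 (max 7 pref)) > min 14 (max 7 pref) ∨
              (2 * PySem.Int.mod td (min 14 (max 7 pref)) = min 14 (max 7 pref) ∧
                PySem.Int.mod (PySem.Int.floordiv td (min 14 (max 7 pref))) 2 = 1)
            then 1 else 0) = pvRoundDiv td (min 14 (max 7 pref)) := by
      unfold pvRoundDiv; split <;> omega
    simp only [hstart, hcount]
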